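-- pv_equiv track=rewrite | github.com/S-Christensen/cartographersStudy | backend/scoringCards.py | jorekburg
-- ===== SOURCE A (Python) =====
-- def jorekburg(grid):
--     column_count = 0
--
--     for col in range(len(grid[0])):
--         Farm_count = 0
--         Water_count = 0
--         for row in range(len(grid)):
--             if grid[row][col] == "Farm":
--                 Farm_count += 1
--             elif grid[row][col] == "Water":
--                 Water_count += 1
--         if Farm_count == Water_count and Farm_count > 0:
--             column_count += 1
--
--     return column_count*4
-- ===== SOURCE B (Python) =====
-- def jorekburg(grid):
--     ncols = len(grid[0])
--     farm = [0] * ncols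
--     water = [0] * ncols
--     for row in grid:
--         farm = [farm[c] + (row[c] == "Farm") for c in range(ncols)]
--         water = [water[c] + (row[c] == "Water") for c in range(ncols)]
--     return 4 * sum(1 for c in range(ncols) if farm[c] == water[c] and farm[c] > 0)
-- ===== Notes on version B (the rewrite author's own statement) =====
-- stated objective: alternative
-- what changed: Replaces A's column-major nested rescans with a two-phase shape: one row-major pass building per-column Farm/Water tally tables, then a separate scan over the tables counting columns with equal positive tallies.
import Mathlib
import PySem

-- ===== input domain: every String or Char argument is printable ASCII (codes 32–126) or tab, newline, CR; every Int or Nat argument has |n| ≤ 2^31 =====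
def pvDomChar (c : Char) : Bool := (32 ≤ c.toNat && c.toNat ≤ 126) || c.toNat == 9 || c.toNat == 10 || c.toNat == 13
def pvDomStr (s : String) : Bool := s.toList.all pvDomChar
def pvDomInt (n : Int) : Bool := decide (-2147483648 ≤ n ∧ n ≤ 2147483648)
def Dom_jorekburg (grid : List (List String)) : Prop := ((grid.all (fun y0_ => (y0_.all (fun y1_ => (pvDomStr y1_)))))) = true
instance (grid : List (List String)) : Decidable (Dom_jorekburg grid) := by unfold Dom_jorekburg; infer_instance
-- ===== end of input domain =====

-- ===== PORT A =====
-- B replaces A's column-major nested rescans with one row-major tally-table pass plus a final table scan (alternative decomposition, same cost).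
-- grid[0] / grid[row][col]: exact for indices in range (guaranteed by Pre_); A raises IndexError outside Pre_.
def jorekburg (grid : List (List String)) : Int :=
  ((List.range (grid.headD []).length).foldl (fun column_count col =>
    let p := (List.range grid.length).foldl (fun (p : Int × Int) row =>
      if (grid.getD row []).getD col "" = "Farm" then (p.1 + 1, p.2)
      else if (grid.getD row []).getD col "" = "Water" then (p.1, p.2 + 1)
      else p) ((0 : Int), (0 : Int))
    if p.1 = p.2 ∧ 0 < p.1 then column_count + 1 else column_count) 0) * 4

-- ===== PORT B =====
-- one row of Source B's loop body: rebuild both per-column tally tables from the current row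
def pvRowStep (n : Nat) (fw : List Int × List Int) (row : List String) : List Int × List Int :=
  ((List.range n).map (fun c => fw.1.getD c 0 + (if row.getD c "" = "Farm" then 1 else 0)),
   (List.range n).map (fun c => fw.2.getD c 0 + (if row.getD c "" = "Water" then 1 else 0)))

def jorekburg_alt (grid : List (List String)) : Int :=
  let n := (grid.headD []).length
  let fw := grid.foldl (pvRowStep n) (List.replicate n 0, List.replicate n 0)
  4 * (((List.range n).countP
        (fun c => decide (fw.1.getD c 0 = fw.2.getD c 0 ∧ 0 < fw.1.getD c 0))) : Int)

-- ===== PRECONDITION & SPEC =====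
-- Pre_ = exactly where the Python A returns: nonempty grid, and every row at least as long as row 0 (else IndexError).
def Pre_jorekburg (grid : List (List String)) : Prop :=
  grid ≠ [] ∧ ∀ row ∈ grid, (grid.headD []).length ≤ row.length
instance (grid : List (List String)) : Decidable (Pre_jorekburg grid) := by
  unfold Pre_jorekburg; infer_instance
def pvWitness_jorekburg : List (List String) := [["Farm", "Water"], ["Water", "Farm"]]

def Spec_jorekburg (grid : List (List String)) (out : Int) : Prop := out = jorekburg_alt grid
instance (grid : List (List String)) (out : Int) : Decidable (Spec_jorekburg grid out) := by unfold Spec_jorekburg; infer_instance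

-- ===== CLAIM (what is proved, stated in full; the proofs are below) =====
def Claim_equal_jorekburg : Prop := ∀ (grid : List (List String)), Dom_jorekburg grid → Pre_jorekburg grid → Spec_jorekburg grid (jorekburg grid)

-- ===== LEMMAS AND PROOFS =====

-- per-column Farm / Water counts, the common yardstick for both ports
def pvFC (grid : List (List String)) (c : Nat) : Int :=
  (grid.countP (fun row => decide (row.getD c "" = "Farm")) : Int)
def pvWC (grid : List (List String)) (c : Nat) : Int :=
  (grid.countP (fun row => decide (row.getD c "" = "Water")) : Int)

-- folding over range l.length with getD is folding over l
theorem pv_foldl_range_getD {α β : Type} (g : β → α → β) (d : α) (l : List α) (init : β) :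
    (List.range l.length).foldl (fun s i => g s (l.getD i d)) init = l.foldl g init := by
  induction l using List.reverseRecOn generalizing init with
  | nil => simp
  | append_singleton l x ih =>
    have hcong : (List.range l.length).foldl (fun s i => g s ((l ++ [x]).getD i d)) init
        = (List.range l.length).foldl (fun s i => g s (l.getD i d)) init := by
      apply PySem.List.foldl_congr_mem
      intro s i hi
      have hlt : i < l.length := List.mem_range.mp hi
      rw [List.getD_append _ _ _ _ hlt]
    simp only [List.length_append, List.length_singleton, List.range_succ, List.foldl_append,
      List.foldl_cons, List.foldl_nil, hcong, ih]
    congr 1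
    simp [List.getD]

-- A's inner loop computes the per-column tallies
theorem pv_inner_fold (l : List (List String)) (c : Nat) (a b : Int) :
    l.foldl (fun (p : Int × Int) row =>
      if row.getD c "" = "Farm" then (p.1 + 1, p.2)
      else if row.getD c "" = "Water" then (p.1, p.2 + 1)
      else p) (a, b) = (a + pvFC l c, b + pvWC l c) := by
  induction l generalizing a b with
  | nil => simp [pvFC, pvWC]
  | cons r t ih =>
    simp only [List.foldl_cons]
    by_cases h1 : r.getD c "" = "Farm"
    · rw [if_pos h1, ih]
      simp only [List.getD] at h1
      simp [pvFC, pvWC, List.countP_cons, h1, Prod.mk.injEq] <;> push_cast <;> omega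
    · rw [if_neg h1]
      by_cases h2 : r.getD c "" = "Water"
      · rw [if_pos h2, ih]
        simp only [List.getD] at h1 h2
        simp [pvFC, pvWC, List.countP_cons, h1, h2, Prod.mk.injEq] <;> push_cast <;> omega
      · rw [if_neg h2, ih]
        simp only [Prod.mk.injEq, pvFC, pvWC, List.countP_cons]
        simp only [List.getD] at h1 h2
        simp [h1, h2]

-- a counting foldl is countP
theorem pv_count_fold (l : List Nat) (q : Nat → Prop) [DecidablePred q] (c0 : Int) :
    l.foldl (fun cc x => if q x then cc + 1 else cc) c0
      = c0 + (l.countP (fun x => decide (q x)) : Int) := by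
  induction l generalizing c0 with
  | nil => simp
  | cons x t ih =>
    simp only [List.foldl_cons, List.countP_cons, decide_eq_true_eq]
    split_ifs with h <;> simp [ih] <;> push_cast <;> omega

theorem pv_getD_map_range (g : Nat → Int) (n c : Nat) (h : c < n) :
    ((List.range n).map g).getD c 0 = g c := by
  simp [List.getD, h]

-- B's row-major fold builds exactly the per-column tallies (at in-range columns)
theorem pv_B_inv (n : Nat) (rows : List (List String)) (f w : List Int) (c : Nat) (h : c < n) :
    (rows.foldl (pvRowStep n) (f, w)).1.getD c 0 = f.getD c 0 + pvFC rows c ∧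
    (rows.foldl (pvRowStep n) (f, w)).2.getD c 0 = w.getD c 0 + pvWC rows c := by
  induction rows generalizing f w with
  | nil => simp [pvFC, pvWC]
  | cons r t ih =>
    simp only [List.foldl_cons, pvRowStep]
    obtain ⟨ih1, ih2⟩ := ih ((List.range n).map (fun c => f.getD c 0 + (if r.getD c "" = "Farm" then 1 else 0)))
               ((List.range n).map (fun c => w.getD c 0 + (if r.getD c "" = "Water" then 1 else 0)))
    refine ⟨?_, ?_⟩
    · rw [ih1, pv_getD_map_range _ _ _ h]
      simp only [pvFC, List.countP_cons]
      simp only [List.getD]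
      by_cases hr : r[c]?.getD "" = "Farm" <;> simp [hr] <;> push_cast <;> ring
    · rw [ih2, pv_getD_map_range _ _ _ h]
      simp only [pvWC, List.countP_cons]
      simp only [List.getD]
      by_cases hr : r[c]?.getD "" = "Water" <;> simp [hr] <;> push_cast <;> ring

-- ===== VERDICT (by name: the statement is the Claim_ definition above) =====
theorem jorekburg_spec : Claim_equal_jorekburg := by
  intro grid _ _
  unfold Spec_jorekburg jorekburg jorekburg_alt
  set n := (grid.headD []).length with hn
  have hA : ∀ col, (List.range grid.length).foldl (fun (p : Int × Int) row =>
      if (grid.getD row []).getD col "" = "Farm" then (p.1 + 1, p.2)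
      else if (grid.getD row []).getD col "" = "Water" then (p.1, p.2 + 1)
      else p) ((0 : Int), (0 : Int)) = (pvFC grid col, pvWC grid col) := by
    intro col
    rw [pv_foldl_range_getD (fun (p : Int × Int) (row : List String) =>
      if row.getD col "" = "Farm" then (p.1 + 1, p.2)
      else if row.getD col "" = "Water" then (p.1, p.2 + 1)
      else p) ([] : List String) grid ((0 : Int), (0 : Int)), pv_inner_fold]
    simp
  simp only [hA]
  rw [pv_count_fold (List.range n)
      (fun col => pvFC grid col = pvWC grid col ∧ 0 < pvFC grid col) 0]
  have hB : ∀ c ∈ List.range n,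
      ((decide ((grid.foldl (pvRowStep n) (List.replicate n 0, List.replicate n 0)).1.getD c 0
          = (grid.foldl (pvRowStep n) (List.replicate n 0, List.replicate n 0)).2.getD c 0 ∧
        0 < (grid.foldl (pvRowStep n) (List.replicate n 0, List.replicate n 0)).1.getD c 0)) = true)
      ↔ (decide (pvFC grid c = pvWC grid c ∧ 0 < pvFC grid c) = true) := by
    intro c hc
    have hlt : c < n := List.mem_range.mp hc
    obtain ⟨h1, h2⟩ := pv_B_inv n grid (List.replicate n 0) (List.replicate n 0) c hlt
    rw [h1, h2]
    simp [List.getD_replicate]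
  rw [List.countP_congr hB]
  ring
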